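-- pv_equiv track=rewrite | github.com/cosmosapjw-quantum/omoknuni_quantum | python/mcts/quantum/phenomena/quantum_error_correction.py | _check_commutation
-- ===== SOURCE A (Python) =====
-- def _check_commutation(pauli1: str, pauli2: str) -> bool:
--     """Check if two Pauli strings commute"""
--     if len(pauli1) != len(pauli2):
--         return False
--
--     anticommutations = 0
--     for p1, p2 in zip(pauli1, pauli2):
--         # Count positions where operators anticommute
--         if (p1 == 'X' and p2 == 'Z') or (p1 == 'Z' and p2 == 'X'):
--             anticommutations += 1
--         elif (p1 == 'Y' and p2 == 'X') or (p1 == 'X' and p2 == 'Y'):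
--             anticommutations += 1
--         elif (p1 == 'Y' and p2 == 'Z') or (p1 == 'Z' and p2 == 'Y'):
--             anticommutations += 1
--
--     # Two operators commute if they anticommute at an even number of positions
--     return anticommutations % 2 == 0
-- ===== SOURCE B (Python) =====
-- def _check_commutation(pauli1: str, pauli2: str) -> bool:
--     """Check if two Pauli strings commute.
--
--     Two equal-length Pauli strings commute iff the number of positions
--     carrying two *distinct* non-identity Paulis is even.  Build the index
--     set of non-identity letters in each string and the index set of
--     disagreeing positions, and test the parity of their intersection.
--     """
--     if len(pauli1) != len(pauli2):
--         return False
--     s1 = {i for i, c in enumerate(pauli1) if c in 'XYZ'}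
--     s2 = {i for i, c in enumerate(pauli2) if c in 'XYZ'}
--     diff = {i for i, (a, b) in enumerate(zip(pauli1, pauli2)) if a != b}
--     return len(s1 & s2 & diff) % 2 == 0
-- ===== Notes on version B (the rewrite author's own statement) =====
-- stated objective: alternative
-- what changed: Instead of one pass with a branch-enumerating anticommutation counter, B stages the work through index sets: it builds the set of non-identity positions of each string and the set of disagreeing positions, intersects them, and tests the parity of the intersection's size.
import Mathlib
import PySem

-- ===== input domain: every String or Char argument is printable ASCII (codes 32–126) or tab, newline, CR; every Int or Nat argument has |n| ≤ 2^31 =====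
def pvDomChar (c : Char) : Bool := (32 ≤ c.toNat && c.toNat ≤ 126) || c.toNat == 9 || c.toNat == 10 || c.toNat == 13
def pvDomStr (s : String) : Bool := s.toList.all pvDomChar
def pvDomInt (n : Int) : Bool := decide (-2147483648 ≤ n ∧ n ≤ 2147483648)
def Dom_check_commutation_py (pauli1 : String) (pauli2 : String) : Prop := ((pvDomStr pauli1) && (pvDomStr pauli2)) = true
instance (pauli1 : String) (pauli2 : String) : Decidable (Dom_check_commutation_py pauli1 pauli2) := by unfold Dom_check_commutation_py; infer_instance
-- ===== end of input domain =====

-- B replaces A's single branch-enumerating counter loop by staged index sets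
-- (non-identity positions of each string, disagreeing positions) and the parity
-- of their intersection's size; same return value, proved below.

-- ===== PORT A =====
def check_commutation_py (pauli1 : String) (pauli2 : String) : Bool :=
  if pauli1.toList.length ≠ pauli2.toList.length then false
  else
    -- anticommutations, A's counter loop
    PySem.Int.mod
      ((pauli1.toList.zip pauli2.toList).foldl (fun acc pq =>
        if (pq.1 == 'X' && pq.2 == 'Z') || (pq.1 == 'Z' && pq.2 == 'X') then acc + 1
        else if (pq.1 == 'Y' && pq.2 == 'X') || (pq.1 == 'X' && pq.2 == 'Y') then acc + 1
        else if (pq.1 == 'Y' && pq.2 == 'Z') || (pq.1 == 'Z' && pq.2 == 'Y') then acc + 1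
        else acc) (0 : Int)) 2 == 0

-- ===== PORT B =====
-- Python's `c in 'XYZ'` on the single character c = membership among the chars of 'XYZ' (exact here).
def pvIsPauli (c : Char) : Bool := "XYZ".toList.contains c

def check_commutation_py_alt (pauli1 : String) (pauli2 : String) : Bool :=
  if pauli1.toList.length ≠ pauli2.toList.length then false
  else
    -- s1, s2 (non-identity index sets), d (disagreeing index set); len(s1 & s2 & d) % 2 == 0
    PySem.Int.mod (PySem.Set.len (PySem.Set.inter (PySem.Set.inter
      (PySem.Set.ofList
        (((PySem.List.enumerate pauli1.toList).filter (fun p => pvIsPauli p.2)).map (·.1)))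
      (PySem.Set.ofList
        (((PySem.List.enumerate pauli2.toList).filter (fun p => pvIsPauli p.2)).map (·.1))))
      (PySem.Set.ofList
        (((PySem.List.enumerate (pauli1.toList.zip pauli2.toList)).filter
            (fun p => p.2.1 != p.2.2)).map (·.1))))) 2 == 0

-- ===== PRECONDITION & SPEC =====
def Spec_check_commutation_py (pauli1 : String) (pauli2 : String) (out : Bool) : Prop := out = check_commutation_py_alt pauli1 pauli2
instance (pauli1 : String) (pauli2 : String) (out : Bool) : Decidable (Spec_check_commutation_py pauli1 pauli2 out) := by unfold Spec_check_commutation_py; infer_instance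

-- ===== CLAIM (what is proved, stated in full; the proofs are below) =====
def Claim_equal_check_commutation_py : Prop := ∀ (pauli1 : String) (pauli2 : String), Dom_check_commutation_py pauli1 pauli2 → Spec_check_commutation_py pauli1 pauli2 (check_commutation_py pauli1 pauli2)

-- ===== LEMMAS AND PROOFS =====

-- the per-position anticommutation predicate, as B sees it
def pvAnti (a b : Char) : Bool := pvIsPauli a && pvIsPauli b && (a != b)

-- A's six-way disjunction is exactly "both non-identity Paulis and distinct"
theorem pvAnti_eq (a b : Char) :
    ((a == 'X' && b == 'Z') || (a == 'Z' && b == 'X') ||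
     ((a == 'Y' && b == 'X') || (a == 'X' && b == 'Y')) ||
     ((a == 'Y' && b == 'Z') || (a == 'Z' && b == 'Y'))) = pvAnti a b := by
  unfold pvAnti pvIsPauli
  by_cases h1 : a = 'X' <;> by_cases h2 : a = 'Z' <;> by_cases h3 : a = 'Y' <;>
    by_cases g1 : b = 'X' <;> by_cases g2 : b = 'Z' <;> by_cases g3 : b = 'Y' <;>
    simp_all

-- an enumerate-filter-map index set is a filter of the index range (hence nodup)
theorem pvIdxSet {α : Type} (xs : List α) (d : α) (p : α → Bool) :
    ((PySem.List.enumerate xs).filter (fun q => p q.2)).map (·.1)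
      = (PySem.List.pyRange 0 (PySem.List.len xs)).filter
          (fun j => p (PySem.List.pyGetD xs j d)) := by
  rw [PySem.List.enumerate_eq_map_pyRange xs d, List.filter_map, List.map_map]
  simp [Function.comp_def]

-- countP over the index range = countP over the list itself
theorem pvCountIdx {α : Type} (xs : List α) (d : α) (p : α → Bool) :
    List.countP (fun k => p (xs.getD k d)) (List.range xs.length) = xs.countP p := by
  induction xs with
  | nil => simp
  | cons x t ih =>
    rw [List.length_cons, List.range_succ_eq_map, List.countP_cons, List.countP_map]
    simp only [List.getD_cons_zero, Function.comp_def, List.getD_cons_succ]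
    rw [ih, List.countP_cons]

-- ===== VERDICT (by name: the statement is the Claim_ definition above) =====
theorem check_commutation_py_spec : Claim_equal_check_commutation_py := by
  intro p1 p2 _
  unfold Spec_check_commutation_py check_commutation_py check_commutation_py_alt
  by_cases h : p1.toList.length ≠ p2.toList.length
  · rw [if_pos h, if_pos h]
  · rw [if_neg h, if_neg h]
    simp only [ne_eq, not_not] at h
    set l1 := p1.toList
    set l2 := p2.toList
    -- A's loop counts the anticommuting positions
    have hfun : (fun (acc : Int) (pq : Char × Char) =>
        if (pq.1 == 'X' && pq.2 == 'Z') || (pq.1 == 'Z' && pq.2 == 'X') then acc + 1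
        else if (pq.1 == 'Y' && pq.2 == 'X') || (pq.1 == 'X' && pq.2 == 'Y') then acc + 1
        else if (pq.1 == 'Y' && pq.2 == 'Z') || (pq.1 == 'Z' && pq.2 == 'Y') then acc + 1
        else acc)
      = (fun (acc : Int) (pq : Char × Char) =>
        if pvAnti pq.1 pq.2 then acc + 1 else acc) := by
      funext acc pq
      rw [← pvAnti_eq pq.1 pq.2]
      cases hb1 : ((pq.1 == 'X' && pq.2 == 'Z') || (pq.1 == 'Z' && pq.2 == 'X')) <;>
        cases hb2 : ((pq.1 == 'Y' && pq.2 == 'X') || (pq.1 == 'X' && pq.2 == 'Y')) <;>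
        cases hb3 : ((pq.1 == 'Y' && pq.2 == 'Z') || (pq.1 == 'Z' && pq.2 == 'Y')) <;>
        simp [hb1, hb2, hb3]
    have hA :
        (l1.zip l2).foldl (fun acc pq =>
          if (pq.1 == 'X' && pq.2 == 'Z') || (pq.1 == 'Z' && pq.2 == 'X') then acc + 1
          else if (pq.1 == 'Y' && pq.2 == 'X') || (pq.1 == 'X' && pq.2 == 'Y') then acc + 1
          else if (pq.1 == 'Y' && pq.2 == 'Z') || (pq.1 == 'Z' && pq.2 == 'Y') then acc + 1
          else acc) (0 : Int)
          = ((l1.zip l2).countP (fun pq => pvAnti pq.1 pq.2) : Int) := by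
      rw [hfun, PySem.List.foldl_if_add_one
        (fun pq : Char × Char => pvAnti pq.1 pq.2) (l1.zip l2) 0, zero_add]
    rw [hA]
    -- B's sets are filters of the index range
    have hlen : PySem.List.len (l1.zip l2) = PySem.List.len l1 := by
      simp [PySem.List.len, List.length_zip, h]
    have hlen2 : PySem.List.len l2 = PySem.List.len l1 := by
      simp [PySem.List.len, h]
    have hs1 := pvIdxSet l1 ' ' pvIsPauli
    have hs2 := pvIdxSet l2 ' ' pvIsPauli
    have hsd := pvIdxSet (l1.zip l2) (' ', ' ') (fun pq => pq.1 != pq.2)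
    rw [hlen2] at hs2
    rw [hlen] at hsd
    rw [hs1, hs2, hsd]
    have hnd : ∀ q : Int → Bool,
        ((PySem.List.pyRange 0 (PySem.List.len l1)).filter q).Nodup :=
      fun q => (PySem.List.nodup_pyRange_one 0 _).filter q
    rw [PySem.Set.ofList_eq_self_of_nodup _ (hnd _),
        PySem.Set.ofList_eq_self_of_nodup _ (hnd _),
        PySem.Set.ofList_eq_self_of_nodup _ (hnd _)]
    -- intersections collapse to one filter over the range
    have hint : PySem.Set.inter (PySem.Set.inter
        ((PySem.List.pyRange 0 (PySem.List.len l1)).filter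
          (fun j => pvIsPauli (PySem.List.pyGetD l1 j ' ')))
        ((PySem.List.pyRange 0 (PySem.List.len l1)).filter
          (fun j => pvIsPauli (PySem.List.pyGetD l2 j ' '))))
        ((PySem.List.pyRange 0 (PySem.List.len l1)).filter
          (fun j => (PySem.List.pyGetD (l1.zip l2) j (' ', ' ')).1
                    != (PySem.List.pyGetD (l1.zip l2) j (' ', ' ')).2))
        = (PySem.List.pyRange 0 (PySem.List.len l1)).filter
            (fun j => pvIsPauli (PySem.List.pyGetD l1 j ' ')
              && pvIsPauli (PySem.List.pyGetD l2 j ' ')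
              && ((PySem.List.pyGetD (l1.zip l2) j (' ', ' ')).1
                  != (PySem.List.pyGetD (l1.zip l2) j (' ', ' ')).2)) := by
      unfold PySem.Set.inter
      rw [List.filter_filter, List.filter_filter]
      refine List.filter_congr (fun j hj => ?_)
      have hj' : 0 ≤ j ∧ j < ((l1.length : Int)) := by
        simpa [PySem.List.mem_pyRange_one, PySem.List.len] using hj
      cases hb1 : pvIsPauli (PySem.List.pyGetD l1 j ' ') <;>
        cases hb2 : pvIsPauli (PySem.List.pyGetD l2 j ' ') <;>
        cases hbd : ((PySem.List.pyGetD (l1.zip l2) j (' ', ' ')).1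
                  != (PySem.List.pyGetD (l1.zip l2) j (' ', ' ')).2) <;>
        simp [List.contains_eq_mem, List.mem_filter, hj, hj'.1, hj'.2, hb1, hb2, hbd]
    rw [hint]
    -- parity: the filtered range has exactly as many elements as A counted
    have hcount :
        ((PySem.List.pyRange 0 (PySem.List.len l1)).filter
            (fun j => pvIsPauli (PySem.List.pyGetD l1 j ' ')
              && pvIsPauli (PySem.List.pyGetD l2 j ' ')
              && ((PySem.List.pyGetD (l1.zip l2) j (' ', ' ')).1
                  != (PySem.List.pyGetD (l1.zip l2) j (' ', ' ')).2))).length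
          = (l1.zip l2).countP (fun pq => pvAnti pq.1 pq.2) := by
      rw [← List.countP_eq_length_filter]
      rw [PySem.List.pyRange_one 0 (PySem.List.len l1)]
      rw [List.countP_map]
      have hlr : ((PySem.List.len l1 : Int) - 0).toNat = (l1.zip l2).length := by
        simp [PySem.List.len, List.length_zip, h]
      rw [hlr]
      rw [← pvCountIdx (l1.zip l2) (' ', ' ') (fun pq => pvAnti pq.1 pq.2)]
      refine List.countP_congr (fun k hk => ?_)
      simp only [List.mem_range] at hk
      simp only [Function.comp_def, zero_add, PySem.List.pyGetD_natCast]
      have hkz : k < (l1.zip l2).length := by simpa using hk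
      have h1k : k < l1.length := by
        rw [List.length_zip] at hkz; omega
      have h2k : k < l2.length := by
        rw [List.length_zip] at hkz; omega
      rw [List.getD_eq_getElem (l1.zip l2) (' ', ' ') hkz,
          List.getD_eq_getElem l1 ' ' h1k, List.getD_eq_getElem l2 ' ' h2k]
      unfold pvAnti
      simp
    rw [PySem.Set.len, hcount]
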